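-- pv_equiv track=rewrite | github.com/tieaz/coding1 | x_xor.py | corrupted_latin_square_xor
-- ===== SOURCE A (Python) =====
-- def corrupted_latin_square_xor(square):
--   n = len(square)
--   row_checksums = [0] * n
--   col_checksums = [0] * n
--
--   checksum = 0
--   for r in range(n):
--     checksum ^= (r + 1)
--     for c in range(n):
--       row_checksums[r] ^= square[r][c]
--       col_checksums[c] ^= square[r][c]
--
--   r = [i for i in range(n) if row_checksums[i] != checksum][0]
--   c = [i for i in range(n) if col_checksums[i] != checksum][0]
--   return (r, c)
-- ===== SOURCE B (Python) =====
-- def corrupted_latin_square_xor(square):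
--   n = len(square)
--   # closed form for XOR of 1..n (no loop), selected by n mod 4
--   checksum = (n, 1, n + 1, 0)[n % 4]
--
--   def first_bad(rows):
--     # early-exit scan: index of the first row whose XOR differs from checksum
--     for i, row in enumerate(rows):
--       acc = 0
--       for j in range(n):
--         acc ^= row[j]
--       if acc != checksum:
--         return i
--
--   r = first_bad(square)
--   transposed = [[square[i][j] for i in range(n)] for j in range(n)]
--   c = first_bad(transposed)
--   return (r, c)
-- ===== Notes on version B (the rewrite author's own statement) =====
-- stated objective: alternative
-- what changed: B replaces A's fused dual-accumulator nested loop and its two full checksum arrays by: an O(1) closed-form target checksum ((n,1,n+1,0)[n%4] instead of XOR-folding 1..n), an early-exit row scan that stops at the first bad row without materializing row_checksums, and a column search done by explicitly transposing the matrix and reusing the same first_bad helper.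
import Mathlib
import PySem

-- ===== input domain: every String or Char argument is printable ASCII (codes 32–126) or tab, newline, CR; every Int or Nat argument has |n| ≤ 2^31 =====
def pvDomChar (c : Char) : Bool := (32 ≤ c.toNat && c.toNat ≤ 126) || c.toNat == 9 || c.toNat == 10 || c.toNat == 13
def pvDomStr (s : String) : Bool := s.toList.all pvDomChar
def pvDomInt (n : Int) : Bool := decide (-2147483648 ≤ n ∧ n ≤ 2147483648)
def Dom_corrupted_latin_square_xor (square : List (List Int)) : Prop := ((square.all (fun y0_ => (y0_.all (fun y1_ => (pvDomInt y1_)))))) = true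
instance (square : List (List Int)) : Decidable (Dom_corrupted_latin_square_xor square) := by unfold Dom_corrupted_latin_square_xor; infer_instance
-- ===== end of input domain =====

-- B replaces A's fused dual-accumulator nested loop by a closed-form target checksum
-- ((n,1,n+1,0)[n%4]), an early-exit first-bad-row scan with no checksum arrays, and a
-- column search over the explicit transpose reusing the same helper.

-- square[r][c]; out-of-range reads (Python IndexError) are excluded by Pre_, so the
-- default 0 is never read on admitted inputs.
def pvAt (square : List (List Int)) (r c : Nat) : Int :=
  (square.getD r []).getD c 0

-- ===== PORT A =====
def corrupted_latin_square_xor (square : List (List Int)) : Int × Int :=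
  let n := square.length
  let st :=
    (List.range n).foldl
      (fun (st : Int × List Int × List Int) (r : Nat) =>
        let checksum := PySem.Int.bxor st.1 ((r : Int) + 1)
        let rc :=
          (List.range n).foldl
            (fun (rc : List Int × List Int) c =>
              (rc.1.set r (PySem.Int.bxor (rc.1.getD r 0) (pvAt square r c)),
               rc.2.set c (PySem.Int.bxor (rc.2.getD c 0) (pvAt square r c))))
            (st.2.1, st.2.2)
        (checksum, rc.1, rc.2))
      (0, List.replicate n 0, List.replicate n 0)
  let rl := (List.range n).filter (fun i => st.2.1.getD i 0 != st.1)
  let cl := (List.range n).filter (fun i => st.2.2.getD i 0 != st.1)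
  ((rl.headD 0 : Nat), (cl.headD 0 : Nat))

-- ===== PORT B =====
-- the inner 'for j in range(n): acc ^= row[j]' of first_bad
def pvRowAcc (n : Nat) (row : List Int) : Int :=
  (List.range n).foldl (fun acc j => PySem.Int.bxor acc (row.getD j 0)) 0

-- 'for i, row in enumerate(rows): … if acc != checksum: return i' (None = fell through)
def firstBad (ck : Int) (n : Nat) : List (List Int) → Nat → Option Nat
  | [], _ => none
  | row :: rest, i =>
    if pvRowAcc n row != ck then some i else firstBad ck n rest (i + 1)

def corrupted_latin_square_xor_alt (square : List (List Int)) : Int × Int :=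
  let n := square.length
  -- checksum = (n, 1, n + 1, 0)[n % 4]
  let checksum : Int := [(n : Int), 1, (n : Int) + 1, 0].getD (n % 4) 0
  let r := (firstBad checksum n square 0).getD 0
  let transposed := (List.range n).map (fun j => (List.range n).map (fun i => pvAt square i j))
  let c := (firstBad checksum n transposed 0).getD 0
  ((r : Nat), (c : Nat))

-- ===== PRECONDITION & SPEC =====
-- helpers for Pre_: xor of row r, xor of column j, and xor of 1..n (all over square[r][c])
def pvRowX (square : List (List Int)) (r : Nat) : Int :=
  (List.range square.length).foldl (fun a c => PySem.Int.bxor a (pvAt square r c)) 0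
def pvColX (square : List (List Int)) (j : Nat) : Int :=
  (List.range square.length).foldl (fun a r => PySem.Int.bxor a (pvAt square r j)) 0
def pvCk (square : List (List Int)) : Int :=
  (List.range square.length).foldl (fun a r => PySem.Int.bxor a ((r : Int) + 1)) 0

-- Pre_ = exactly the inputs where the Python A returns normally: every row has at least
-- n = len(square) entries (else IndexError), and a mismatching row and a mismatching
-- column both exist (else the final [...][0] raises IndexError).
def Pre_corrupted_latin_square_xor (square : List (List Int)) : Prop :=
  (∀ row ∈ square, square.length ≤ row.length) ∧
  (∃ i ∈ List.range square.length, pvRowX square i ≠ pvCk square) ∧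
  (∃ j ∈ List.range square.length, pvColX square j ≠ pvCk square)

instance (square : List (List Int)) : Decidable (Pre_corrupted_latin_square_xor square) := by
  unfold Pre_corrupted_latin_square_xor; infer_instance

def pvWitness_corrupted_latin_square_xor : List (List Int) :=
  [[1, 2, 3], [2, 3, 1], [3, 9, 2]]

def Spec_corrupted_latin_square_xor (square : List (List Int)) (out : Int × Int) : Prop := out = corrupted_latin_square_xor_alt square
instance (square : List (List Int)) (out : Int × Int) : Decidable (Spec_corrupted_latin_square_xor square out) := by unfold Spec_corrupted_latin_square_xor; infer_instance

-- ===== CLAIM (what is proved, stated in full; the proofs are below) =====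
def Claim_equal_corrupted_latin_square_xor : Prop := ∀ (square : List (List Int)), Dom_corrupted_latin_square_xor square → Pre_corrupted_latin_square_xor square → Spec_corrupted_latin_square_xor square (corrupted_latin_square_xor square)

-- ===== LEMMAS AND PROOFS =====

-- first element of a filter is the first match
theorem head?_filter_eq_find? {α : Type} (p : α → Bool) (l : List α) :
    (l.filter p).head? = l.find? p := by
  induction l with
  | nil => rfl
  | cons a t ih => by_cases h : p a = true <;> simp [List.find?, h, ih]

-- getD of a map over range
theorem getD_map_range (n i : Nat) (f : Nat → Int) (h : i < n) :
    (((List.range n).map f).getD i 0) = f i := by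
  simp [List.getD_eq_getElem?_getD, h]

-- getD of a set
theorem getD_set_ite (l : List Int) (i j : Nat) (x : Int) :
    (l.set i x).getD j 0 = if i = j ∧ i < l.length then x else l.getD j 0 := by
  simp only [List.getD_eq_getElem?_getD, List.getElem?_set]
  by_cases h : i = j
  · subst h; by_cases h2 : i < l.length <;> simp [h2]
  · simp [h]

-- the inner loop of A over c = 0..m-1
def pvInner (square : List (List Int)) (r m : Nat) (rc : List Int × List Int) :
    List Int × List Int :=
  (List.range m).foldl
    (fun (rc : List Int × List Int) c =>
      (rc.1.set r (PySem.Int.bxor (rc.1.getD r 0) (pvAt square r c)),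
       rc.2.set c (PySem.Int.bxor (rc.2.getD c 0) (pvAt square r c))))
    rc

theorem pvInner_spec (square : List (List Int)) (r : Nat) (n : Nat) (hr : r < n)
    (m : Nat) (hm : m ≤ n) (rows cols : List Int)
    (hrows : rows.length = n) (hcols : cols.length = n) :
    (pvInner square r m (rows, cols)).1.length = n ∧
    (pvInner square r m (rows, cols)).2.length = n ∧
    (∀ j, (pvInner square r m (rows, cols)).1.getD j 0 =
      if j = r then (List.range m).foldl (fun a c => PySem.Int.bxor a (pvAt square r c)) (rows.getD r 0)
      else rows.getD j 0) ∧
    (∀ j, (pvInner square r m (rows, cols)).2.getD j 0 =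
      if j < m then PySem.Int.bxor (cols.getD j 0) (pvAt square r j) else cols.getD j 0) := by
  induction m with
  | zero =>
    refine ⟨hrows, hcols, ?_, ?_⟩ <;> intro j
    · by_cases hj : j = r
      · subst hj; simp [pvInner]
      · simp [pvInner, hj]
    · simp [pvInner]
  | succ m ih =>
    obtain ⟨h1, h2, h3, h4⟩ := ih (Nat.le_of_succ_le hm)
    have hstep : pvInner square r (m+1) (rows, cols) =
        ((pvInner square r m (rows, cols)).1.set r
            (PySem.Int.bxor ((pvInner square r m (rows, cols)).1.getD r 0) (pvAt square r m)),
         (pvInner square r m (rows, cols)).2.set m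
            (PySem.Int.bxor ((pvInner square r m (rows, cols)).2.getD m 0) (pvAt square r m))) := by
      rw [pvInner, List.range_succ, List.foldl_append]
      rfl
    refine ⟨?_, ?_, ?_, ?_⟩
    · rw [hstep]; simpa using h1
    · rw [hstep]; simpa using h2
    · intro j
      rw [hstep]
      show ((pvInner square r m (rows, cols)).1.set r _).getD j 0 = _
      rw [getD_set_ite, h3 r, h3 j, if_pos rfl]
      by_cases hj : j = r
      · rw [if_pos ⟨hj.symm, by omega⟩, if_pos hj, List.range_succ, List.foldl_append]
        rfl
      · rw [if_neg (by tauto), if_neg hj, if_neg hj]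
    · intro j
      rw [hstep]
      show ((pvInner square r m (rows, cols)).2.set m _).getD j 0 = _
      rw [getD_set_ite, h4 m, h4 j, if_neg (Nat.lt_irrefl m)]
      by_cases hj : j = m
      · rw [if_pos ⟨hj.symm, by omega⟩, hj, if_pos (Nat.lt_succ_self m)]
      · rw [if_neg (by tauto)]
        by_cases hjm : j < m
        · rw [if_pos hjm, if_pos (by omega)]
        · rw [if_neg hjm, if_neg (by omega)]

-- the outer loop of A over r = 0..k-1 (same lambda as in the port; pvInner is its inner foldl)
def pvOuter (square : List (List Int)) (k : Nat) : Int × List Int × List Int :=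
  (List.range k).foldl
    (fun (st : Int × List Int × List Int) (r : Nat) =>
      let checksum := PySem.Int.bxor st.1 ((r : Int) + 1)
      let rc :=
        (List.range square.length).foldl
          (fun (rc : List Int × List Int) c =>
            (rc.1.set r (PySem.Int.bxor (rc.1.getD r 0) (pvAt square r c)),
             rc.2.set c (PySem.Int.bxor (rc.2.getD c 0) (pvAt square r c))))
          (st.2.1, st.2.2)
      (checksum, rc.1, rc.2))
    (0, List.replicate square.length 0, List.replicate square.length 0)

theorem portA_eq (square : List (List Int)) :
    corrupted_latin_square_xor square =
      (((((List.range square.length).filter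
          (fun i => (pvOuter square square.length).2.1.getD i 0 != (pvOuter square square.length).1)).headD 0 : Nat) : Int),
       ((((List.range square.length).filter
          (fun i => (pvOuter square square.length).2.2.getD i 0 != (pvOuter square square.length).1)).headD 0 : Nat) : Int)) := rfl

theorem pvOuter_succ (square : List (List Int)) (k : Nat) :
    pvOuter square (k + 1) =
      (PySem.Int.bxor (pvOuter square k).1 ((k : Int) + 1),
       (pvInner square k square.length ((pvOuter square k).2.1, (pvOuter square k).2.2)).1,
       (pvInner square k square.length ((pvOuter square k).2.1, (pvOuter square k).2.2)).2) := by
  rw [pvOuter, List.range_succ, List.foldl_append]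
  rfl

theorem pvOuter_spec (square : List (List Int)) (k : Nat) (hk : k ≤ square.length) :
    (pvOuter square k).1 = (List.range k).foldl (fun a (r : Nat) => PySem.Int.bxor a ((r : Int) + 1)) 0 ∧
    (pvOuter square k).2.1.length = square.length ∧
    (pvOuter square k).2.2.length = square.length ∧
    (∀ j, (pvOuter square k).2.1.getD j 0 = if j < k then pvRowX square j else 0) ∧
    (∀ j, (pvOuter square k).2.2.getD j 0 =
      if j < square.length then (List.range k).foldl (fun a (r : Nat) => PySem.Int.bxor a (pvAt square r j)) 0 else 0) := by
  induction k with
  | zero =>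
    refine ⟨rfl, by simp [pvOuter], by simp [pvOuter], ?_, ?_⟩ <;> intro j <;>
      simp [pvOuter, List.getD_eq_getElem?_getD, List.getElem?_replicate] <;>
      by_cases hj : j < square.length <;> simp [hj]
  | succ k ih =>
    obtain ⟨hck, hlen1, hlen2, hrows, hcols⟩ := ih (Nat.le_of_succ_le hk)
    have hkn : k < square.length := hk
    obtain ⟨g1, g2, g3, g4⟩ := pvInner_spec square k square.length hkn square.length (le_refl _)
      (pvOuter square k).2.1 (pvOuter square k).2.2 hlen1 hlen2
    rw [pvOuter_succ]
    refine ⟨?_, g1, g2, ?_, ?_⟩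
    · rw [List.range_succ, List.foldl_append, ← hck]
      rfl
    · intro j
      rw [g3 j, hrows k, if_neg (Nat.lt_irrefl k), hrows j]
      by_cases hj : j = k
      · rw [if_pos hj, hj, if_pos (Nat.lt_succ_self k), pvRowX]
      · rw [if_neg hj]
        by_cases hjk : j < k
        · rw [if_pos hjk, if_pos (by omega)]
        · rw [if_neg hjk, if_neg (by omega)]
    · intro j
      rw [g4 j, hcols j]
      by_cases hj : j < square.length
      · rw [if_pos hj, if_pos hj, if_pos hj, List.range_succ, List.foldl_append]
        rfl
      · rw [if_neg hj, if_neg hj, if_neg hj]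

-- B's early-exit scan is find? over the index range (shifted by the start index)
theorem firstBad_eq_find? (ck : Int) (n : Nat) (rows : List (List Int)) (i : Nat) :
    firstBad ck n rows i =
      ((List.range rows.length).find? (fun k => pvRowAcc n (rows.getD k []) != ck)).map (· + i) := by
  induction rows generalizing i with
  | nil => rfl
  | cons row rest ih =>
    rw [firstBad]
    by_cases h : (pvRowAcc n row != ck) = true
    · rw [if_pos h, List.length_cons, List.range_succ_eq_map,
        List.find?_cons_of_pos (by simpa using h)]
      simp
    · have hcongr : ((fun k => pvRowAcc n ((row :: rest).getD k []) != ck) ∘ (· + 1))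
          = (fun k => pvRowAcc n (rest.getD k []) != ck) :=
        funext (fun k => by simp [Function.comp])
      rw [if_neg h, ih (i + 1), List.length_cons, List.range_succ_eq_map,
        List.find?_cons_of_neg (by simpa using h), List.find?_map, hcongr]
      rcases (List.range rest.length).find? (fun k => pvRowAcc n (rest.getD k []) != ck) with _ | v
      · rfl
      · simp only [Option.map_some]
        congr 1
        omega

-- XOR of 1..n as a Nat fold
def natCk (n : Nat) : Nat := (List.range n).foldl (fun a r => a ^^^ (r + 1)) 0

theorem pvCk_eq_natCk (square : List (List Int)) : pvCk square = (natCk square.length : Int) := by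
  rw [pvCk, natCk]
  generalize square.length = n
  induction n with
  | zero => rfl
  | succ n ih =>
    simp only [bind_pure_comp, Functor.map, List.range_succ, List.map_append, List.map_cons,
      List.map_nil, List.foldl_append, List.foldl_cons, List.foldl_nil] at *
    rw [ih, show ((n : Int) + 1) = ((n + 1 : Nat) : Int) by push_cast; ring,
      PySem.Int.bxor_natCast]

-- the closed form (n, 1, n+1, 0)[n % 4] for XOR of 1..n, via Mathlib's Nat.xor_range
theorem natCk_closed (n : Nat) : natCk n = [n, 1, n + 1, 0].getD (n % 4) 0 := by
  have h1 : natCk n = (List.range (n + 1)).foldl (· ^^^ ·) 0 := by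
    rw [natCk, List.range_succ_eq_map, List.foldl_cons, List.foldl_map]
    rfl
  rw [h1, Nat.xor_range]
  have hv : (Fin.ofNat 4 n : Nat) = n % 4 := Fin.val_ofNat ..
  have h4 : n % 4 = 0 ∨ n % 4 = 1 ∨ n % 4 = 2 ∨ n % 4 = 3 := by omega
  rcases h4 with h | h | h | h <;>
    · have hf : Fin.ofNat 4 n = ⟨n % 4, by omega⟩ := Fin.ext (by rw [hv])
      rw [hf]
      simp [h]

-- B's Int-valued closed-form checksum equals pvCk
theorem checksum_closed (square : List (List Int)) :
    ([((square.length : Nat) : Int), 1, ((square.length : Nat) : Int) + 1, 0].getD (square.length % 4) 0)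
      = pvCk square := by
  rw [pvCk_eq_natCk, natCk_closed]
  have h4 : square.length % 4 = 0 ∨ square.length % 4 = 1 ∨ square.length % 4 = 2 ∨
      square.length % 4 = 3 := by omega
  rcases h4 with h | h | h | h <;> simp [h]

-- pvRowAcc on the k-th row of square is pvRowX (when n = square.length)
theorem pvRowAcc_getD (square : List (List Int)) (k : Nat) :
    pvRowAcc square.length (square.getD k []) = pvRowX square k := rfl

-- pvRowAcc on the k-th transposed row is pvColX
theorem pvRowAcc_transposed (square : List (List Int)) (k : Nat) (hk : k < square.length) :
    pvRowAcc square.length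
      (((List.range square.length).map
        (fun j => (List.range square.length).map (fun i => pvAt square i j))).getD k []) =
      pvColX square k := by
  have hrow : ((List.range square.length).map
      (fun j => (List.range square.length).map (fun i => pvAt square i j))).getD k [] =
      (List.range square.length).map (fun i => pvAt square i k) := by
    simp [List.getD_eq_getElem?_getD, hk]
  rw [hrow, pvRowAcc, pvColX]
  apply PySem.List.foldl_congr_mem
  intro a r hr
  rw [getD_map_range _ r _ (List.mem_range.mp hr)]

-- ===== VERDICT (by name: the statement is the Claim_ definition above) =====
theorem corrupted_latin_square_xor_spec : Claim_equal_corrupted_latin_square_xor := by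
  intro square _hdom _hpre
  unfold Spec_corrupted_latin_square_xor
  obtain ⟨hck, hl1, hl2, hrows, hcols⟩ := pvOuter_spec square square.length (le_refl _)
  have hcksum : (pvOuter square square.length).1 = pvCk square := by
    simp only [pvCk, bind_pure_comp, Functor.map, List.foldl_map]
    exact hck
  rw [portA_eq]
  simp only [corrupted_latin_square_xor_alt]
  rw [firstBad_eq_find?, firstBad_eq_find?]
  have hlenT : ((List.range square.length).map
      (fun j => (List.range square.length).map (fun i => pvAt square i j))).length =
      square.length := by simp
  have hckB : ([((square.length : Nat) : Int), 1, ((square.length : Nat) : Int) + 1, 0].getD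
      (square.length % 4) 0) = pvCk square := checksum_closed square
  congr 1
  · -- rows
    have hpred : ∀ i ∈ List.range square.length,
        ((pvOuter square square.length).2.1.getD i 0 != (pvOuter square square.length).1) =
        (pvRowAcc square.length (square.getD i []) !=
          [((square.length : Nat) : Int), 1, ((square.length : Nat) : Int) + 1, 0].getD (square.length % 4) 0) := by
      intro i hi
      rw [List.mem_range] at hi
      rw [hrows i, if_pos hi, hcksum, hckB, pvRowAcc_getD]
    rw [List.filter_congr hpred, List.headD_eq_head?_getD, head?_filter_eq_find?]
    simp
  · -- columns
    rw [hlenT]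
    have hpred : ∀ i ∈ List.range square.length,
        ((pvOuter square square.length).2.2.getD i 0 != (pvOuter square square.length).1) =
        (pvRowAcc square.length
          (((List.range square.length).map
            (fun j => (List.range square.length).map (fun i => pvAt square i j))).getD i []) !=
          [((square.length : Nat) : Int), 1, ((square.length : Nat) : Int) + 1, 0].getD (square.length % 4) 0) := by
      intro i hi
      rw [List.mem_range] at hi
      rw [hcols i, if_pos hi, hcksum, hckB, pvRowAcc_transposed square i hi, pvColX]
    rw [List.filter_congr hpred, List.headD_eq_head?_getD, head?_filter_eq_find?]
    simp
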